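-- pv_equiv track=rewrite | github.com/jramaswami/Binary_Search_Python | every_sublist_containing_unique_element.py | solve
-- ===== SOURCE A (Python) =====
-- import collections
--
-- def solve(nums):
--     def check(left, right):
--         # Base Case.
--         if left >= right:
--             return True
--
--         freqs = collections.Counter(nums[left:right+1])
--         min_freq = min(freqs.values())
--         if min_freq > 1:
--             return False
--         # Find a unique elements and check that subarrays excluding
--         # those elements have a unique element.
--         t = left
--         for i, n in enumerate(nums[left:right+1], start=left):
--             if freqs[n] == 1:
--                 if not check(t, i-1):
--                     return False
--                 t = i + 1
--         return check(t, right)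
--
--     return check(0, len(nums)-1)
-- ===== SOURCE B (Python) =====
-- def solve(nums):
--     # Direct check of the property: every sublist nums[l:r+1] must contain
--     # an element occurring exactly once in it.
--     n = len(nums)
--     for l in range(n):
--         for r in range(l, n):
--             seg = nums[l:r+1]
--             if all(seg.count(x) > 1 for x in seg):
--                 return False
--     return True
-- ===== Notes on version B (the rewrite author's own statement) =====
-- stated objective: simpler
-- what changed: Replaces A's recursive divide-at-unique-elements check with a direct brute-force test that every contiguous sublist contains an element occurring exactly once in it (two nested loops, no recursion, no Counter).
import Mathlib
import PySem

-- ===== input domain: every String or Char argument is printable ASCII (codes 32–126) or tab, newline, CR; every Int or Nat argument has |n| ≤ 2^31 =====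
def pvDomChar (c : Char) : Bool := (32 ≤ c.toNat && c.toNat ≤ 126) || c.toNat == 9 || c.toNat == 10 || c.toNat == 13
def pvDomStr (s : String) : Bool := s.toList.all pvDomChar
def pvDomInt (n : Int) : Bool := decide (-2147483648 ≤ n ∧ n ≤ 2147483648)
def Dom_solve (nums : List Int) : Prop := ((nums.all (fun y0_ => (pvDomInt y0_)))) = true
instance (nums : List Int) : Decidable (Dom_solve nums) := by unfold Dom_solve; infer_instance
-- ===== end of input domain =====

-- B replaces A's recursive divide-at-unique-elements procedure with a direct brute-force
-- check that every contiguous sublist contains an element occurring exactly once in it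
-- (objective: simpler; not faster).

-- ===== PORT A =====
-- The inner recursion `check(left, right)` of A terminates because each recursive segment
-- is strictly shorter; the port makes this structural with a fuel counter
-- (nums.length + 1 levels suffice: fuel never runs out on the call `solve` makes,
-- which is proved along the way in `checkA_iff` below).
def checkA (nums : List Int) : Nat → Int → Int → Bool
  | 0, _, _ => true                               -- fuel exhausted: unreachable from `solve`
  | fuel+1, left, right =>
    if left ≥ right then true
    else
      let seg := PySem.List.slice nums (some left) (some (right+1))
      let freqs := PySem.Dict.counter seg
      match PySem.List.min? (PySem.Dict.values freqs) (fun v => v) with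
      | none => true                              -- Python raises (min of empty); unreachable from `solve`
      | some minFreq =>
        if minFreq > 1 then false
        else
          let st := (PySem.List.enumerate seg left).foldl
            (fun (st : Int × Bool) p =>
              if st.2 then st
              else if PySem.Dict.getD freqs p.2 0 == 1 then
                if checkA nums fuel st.1 (p.1 - 1) then (p.1 + 1, st.2)
                else (st.1, true)
              else st)
            (left, false)
          if st.2 then false else checkA nums fuel st.1 right


def solve (nums : List Int) : Bool :=
  checkA nums (nums.length + 1) 0 ((nums.length : Int) - 1)

-- ===== PORT B =====
def solve_alt (nums : List Int) : Bool :=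
  let n : Int := (nums.length : Int)
  !((PySem.List.pyRange 0 n 1).any (fun l =>
    (PySem.List.pyRange l n 1).any (fun r =>
      let seg := PySem.List.slice nums (some l) (some (r + 1))
      seg.all (fun x => decide (1 < PySem.List.count seg x)))))

-- ===== PRECONDITION & SPEC =====
def Spec_solve (nums : List Int) (out : Bool) : Prop := out = solve_alt nums
instance (nums : List Int) (out : Bool) : Decidable (Spec_solve nums out) := by unfold Spec_solve; infer_instance

-- ===== CLAIM (what is proved, stated in full; the proofs are below) =====
def Claim_equal_solve : Prop := ∀ (nums : List Int), Dom_solve nums → Spec_solve nums (solve nums)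

-- ===== LEMMAS AND PROOFS =====

-- the segment nums[l:r+1]
def Sg (nums : List Int) (l r : Int) : List Int :=
  PySem.List.slice nums (some l) (some (r+1))

-- conjunction of A's recursive calls on the gaps between the unique positions `us`
def runGaps (nums : List Int) (F : Nat) (r : Int) (us : List Int) (t : Int) : Bool :=
  match us with
  | [] => checkA nums F t r
  | u :: us => checkA nums F t (u - 1) && runGaps nums F r us (u + 1)


-- "the segment nums[l:r+1] contains an element unique in it"
def Good (nums : List Int) (l r : Int) : Prop :=
  ∃ x ∈ Sg nums l r, (Sg nums l r).count x = 1

def AllGood (nums : List Int) (l r : Int) : Prop :=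
  ∀ a b : Int, l ≤ a → a ≤ b → b ≤ r → Good nums a b

theorem Sg_eq (nums : List Int) (l r : Int) (hl : 0 ≤ l) (hr : 0 ≤ r + 1) :
    Sg nums l r = (nums.drop l.toNat).take ((r+1).toNat - l.toNat) := by
  unfold Sg; exact PySem.List.slice_toNat nums hl hr

theorem take_one_eq (xs : List Int) (h : 0 < xs.length) : xs.take 1 = [xs[0]] := by
  rcases xs with _ | ⟨x, t⟩
  · simp at h
  · simp

theorem good_single (nums : List Int) (l : Int) (hl : 0 ≤ l) (hn : l < nums.length) :
    Good nums l l := by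
  have h1 : Sg nums l l = (nums.drop l.toNat).take 1 := by
    rw [Sg_eq nums l l hl (by omega)]; congr 1; omega
  have hlt : l.toNat < nums.length := by omega
  have h2 : (nums.drop l.toNat).take 1 = [nums[l.toNat]] := by
    rw [take_one_eq _ (by simp; omega), List.getElem_drop]; simp
  refine ⟨nums[l.toNat], ?_, ?_⟩ <;> rw [h1, h2] <;> simp

theorem Sg_sublist (nums : List Int) (l r a b : Int) (hl : 0 ≤ l) (hla : l ≤ a)
    (hab : a ≤ b) (hbr : b ≤ r) : (Sg nums a b).Sublist (Sg nums l r) := by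
  rw [Sg_eq nums l r hl (by omega), Sg_eq nums a b (by omega) (by omega)]
  have key : (nums.drop a.toNat).take ((b+1).toNat - a.toNat)
      = (((nums.drop l.toNat).take ((r+1).toNat - l.toNat)).drop (a.toNat - l.toNat)).take ((b+1).toNat - a.toNat) := by
    rw [List.drop_take, List.drop_drop]
    rw [List.take_take]
    congr 1
    · omega
    · congr 1; omega
  rw [key]
  exact ((List.take_sublist _ _).trans (List.drop_sublist _ _))

theorem mem_Sg (nums : List Int) (a b u : Int) (ha : 0 ≤ a) (hau : a ≤ u) (hub : u ≤ b)
    (hun : u < nums.length) : nums[u.toNat]! ∈ Sg nums a b := by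
  rw [Sg_eq nums a b ha (by omega)]
  have h1 : u.toNat < nums.length := by omega
  rw [getElem!_pos nums u.toNat h1]
  have hlen : u.toNat - a.toNat < ((nums.drop a.toNat).take ((b+1).toNat - a.toNat)).length := by
    simp [List.length_take, List.length_drop]; omega
  have : ((nums.drop a.toNat).take ((b+1).toNat - a.toNat))[u.toNat - a.toNat]'hlen = nums[u.toNat] := by
    rw [List.getElem_take, List.getElem_drop]
    congr 1; omega
  exact this ▸ List.getElem_mem _

theorem good_of_splitter (nums : List Int) (l r a b u : Int) (hl : 0 ≤ l) (hla : l ≤ a)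
    (hau : a ≤ u) (hub : u ≤ b) (hbr : b ≤ r) (hun : u < nums.length)
    (huniq : (Sg nums l r).count (nums[u.toNat]!) = 1) : Good nums a b := by
  have hmem := mem_Sg nums a b u (by omega) hau hub hun
  have hle : (Sg nums a b).count nums[u.toNat]! ≤ (Sg nums l r).count nums[u.toNat]! :=
    (Sg_sublist nums l r a b hl hla (by omega) hbr).count_le _
  have hpos : 0 < (Sg nums a b).count nums[u.toNat]! := List.count_pos_iff.mpr hmem
  exact ⟨nums[u.toNat]!, hmem, by omega⟩

theorem counter_values (seg : List Int) :
    PySem.Dict.values (PySem.Dict.counter seg)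
      = (PySem.Set.ofList seg).map (fun k => ((seg.count k : Nat) : Int)) := by
  rw [PySem.Dict.values_eq_map_keys _ (PySem.Dict.nodup_keys_counter seg) 0,
      PySem.Dict.keys_counter]
  exact List.map_congr_left (fun k _ => PySem.Dict.getD_counter seg k)

theorem min_values_cases (seg : List Int) (hne : seg ≠ []) :
    ∃ m : Int, PySem.List.min? (PySem.Dict.values (PySem.Dict.counter seg)) (fun v => v) = some m ∧
      (∀ x ∈ seg, m ≤ (seg.count x : Int)) ∧ (∃ x ∈ seg, (seg.count x : Int) = m) := by
  rw [counter_values]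
  have hne' : (PySem.Set.ofList seg).map (fun k => ((seg.count k : Nat) : Int)) ≠ [] := by
    simp only [ne_eq, List.map_eq_nil_iff]
    intro h
    rcases seg with _ | ⟨a, t⟩
    · exact hne rfl
    · have : a ∈ PySem.Set.ofList (a :: t) := by
        rw [PySem.Set.mem_ofList]; simp
      rw [h] at this; simp at this
  rcases hm : PySem.List.min? ((PySem.Set.ofList seg).map fun k => ((seg.count k : Nat) : Int)) (fun v => v) with _ | m
  · exact absurd ((PySem.List.min?_eq_none_iff _ _).mp hm) hne'
  · refine ⟨m, rfl, ?_, ?_⟩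
    · intro x hx
      exact PySem.List.min?_isMin hm _ (List.mem_map.mpr ⟨x, (PySem.Set.mem_ofList _ _).mpr hx, rfl⟩)
    · have := PySem.List.min?_mem hm
      rcases List.mem_map.mp this with ⟨k, hk, he⟩
      exact ⟨k, (PySem.Set.mem_ofList _ _).mp hk, he⟩

theorem length_Sg (nums : List Int) (l r : Int) (hl : 0 ≤ l) (hr : 0 ≤ r + 1) :
    (Sg nums l r).length = min ((r+1).toNat - l.toNat) (nums.length - l.toNat) := by
  rw [Sg_eq nums l r hl hr]
  simp [List.length_take, List.length_drop]

theorem Sg_getElem (nums : List Int) (l r : Int) (k : Nat) (hl : 0 ≤ l)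
    (hk : k < (Sg nums l r).length) (hr : 0 ≤ r + 1) :
    (Sg nums l r)[k]'hk = nums[l.toNat + k]'(by
      have := length_Sg nums l r hl hr; omega) := by
  have hlen := length_Sg nums l r hl hr
  have : (Sg nums l r)[k]'hk
      = ((nums.drop l.toNat).take ((r+1).toNat - l.toNat))[k]'(by
          rw [← Sg_eq nums l r hl hr]; exact hk) := by
    congr 1
    exact Sg_eq nums l r hl hr
  rw [this, List.getElem_take, List.getElem_drop]

theorem mem_U (nums : List Int) (l r u : Int) (hl : 0 ≤ l) (hlr : l < r)
    (hrn : r < nums.length) :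
    (u ∈ (PySem.List.enumerate (Sg nums l r) l).filterMap
        (fun p => if PySem.Dict.getD (PySem.Dict.counter (Sg nums l r)) p.2 0 == 1
                  then some p.1 else none))
    ↔ (l ≤ u ∧ u ≤ r ∧ (Sg nums l r).count (nums[u.toNat]!) = 1) := by
  have hlen := length_Sg nums l r hl (by omega)
  rw [List.mem_filterMap]
  constructor
  · rintro ⟨p, hp, hf⟩
    rcases (PySem.List.mem_enumerate_iff _ _ _).mp hp with ⟨k, hk, rfl⟩
    split at hf
    case isFalse => exact absurd hf (by simp)
    case isTrue hc =>
      rw [Option.some.injEq] at hf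
      subst hf
      have hkr : l + (k : Int) ≤ r := by omega
      have hkn : l.toNat + k < nums.length := by omega
      have hget : (Sg nums l r)[k] = nums[(l + (k : Int)).toNat]! := by
        rw [Sg_getElem nums l r k hl hk (by omega), getElem!_pos nums _ (by omega : (l + (k : Int)).toNat < nums.length)]
        congr 1
        omega
      rw [PySem.Dict.getD_counter, hget] at hc
      have hcount : (Sg nums l r).count (nums[(l + (k : Int)).toNat]!) = 1 := by
        have := beq_iff_eq.mp hc
        exact_mod_cast this
      exact ⟨by omega, hkr, hcount⟩
  · rintro ⟨hlu, hur, hcount⟩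
    have hun : u < nums.length := by omega
    have hk : u.toNat - l.toNat < (Sg nums l r).length := by omega
    refine ⟨(l + ((u.toNat - l.toNat : Nat) : Int), (Sg nums l r)[u.toNat - l.toNat]'hk), ?_, ?_⟩
    · exact (PySem.List.mem_enumerate_iff _ _ _).mpr ⟨u.toNat - l.toNat, hk, rfl⟩
    · have hget : (Sg nums l r)[u.toNat - l.toNat]'hk = nums[u.toNat]! := by
        rw [Sg_getElem nums l r _ hl hk (by omega), getElem!_pos nums _ (by omega : u.toNat < nums.length)]
        congr 1
        omega
      have hc : PySem.Dict.getD (PySem.Dict.counter (Sg nums l r)) ((Sg nums l r)[u.toNat - l.toNat]'hk) 0 == 1 := by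
        rw [PySem.Dict.getD_counter, hget, hcount]
        rfl
      simp only [hc, if_true, Option.some.injEq]
      omega

theorem loop_frozen (nums : List Int) (F : Nat) (freqs : PySem.Dict Int Int) :
    ∀ (ps : List (Int × Int)) (t : Int),
    ps.foldl (fun (st : Int × Bool) p =>
        if st.2 then st
        else if PySem.Dict.getD freqs p.2 0 == 1 then
          if checkA nums F st.1 (p.1 - 1) then (p.1 + 1, st.2)
          else (st.1, true)
        else st) (t, true) = (t, true) := by
  intro ps
  induction ps with
  | nil => intro t; rfl
  | cons p ps ih => intro t; simpa using ih t

theorem loop_eq (nums : List Int) (F : Nat) (freqs : PySem.Dict Int Int) (r : Int) :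
    ∀ (ps : List (Int × Int)) (t : Int),
    (if (ps.foldl (fun (st : Int × Bool) p =>
        if st.2 then st
        else if PySem.Dict.getD freqs p.2 0 == 1 then
          if checkA nums F st.1 (p.1 - 1) then (p.1 + 1, st.2)
          else (st.1, true)
        else st) (t, false)).2 then false
     else checkA nums F (ps.foldl (fun (st : Int × Bool) p =>
        if st.2 then st
        else if PySem.Dict.getD freqs p.2 0 == 1 then
          if checkA nums F st.1 (p.1 - 1) then (p.1 + 1, st.2)
          else (st.1, true)
        else st) (t, false)).1 r)
    = runGaps nums F r
        (ps.filterMap (fun p => if PySem.Dict.getD freqs p.2 0 == 1 then some p.1 else none)) t := by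
  intro ps
  induction ps with
  | nil => intro t; simp [runGaps]
  | cons p ps ih =>
    intro t
    by_cases hp : PySem.Dict.getD freqs p.2 0 == 1
    · by_cases hc : checkA nums F t (p.1 - 1)
      · simp only [List.foldl_cons, List.filterMap_cons, hp, if_true, hc]
        rw [runGaps, hc, Bool.true_and]
        exact ih (p.1 + 1)
      · simp only [List.foldl_cons, List.filterMap_cons, hp, if_true, hc, Bool.false_eq_true,
          if_false]
        rw [loop_frozen, runGaps]
        simp [hc]
    · simp only [List.foldl_cons, List.filterMap_cons, hp, Bool.false_eq_true, if_false]
      exact ih t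
theorem runGapsIff (nums : List Int) (F : Nat) (l r : Int)
    (IH : ∀ l' r' : Int, 0 ≤ l' → r' < nums.length → (r' - l').toNat + 1 ≤ F →
      (checkA nums F l' r' = true ↔ AllGood nums l' r'))
    (hl : 0 ≤ l) (hlr : l < r) (hrn : r < nums.length) (hF : (r - l).toNat ≤ F) :
    ∀ (us : List Int) (t : Int), l ≤ t → t ≤ r + 1 → (us = [] → l < t) →
      us.Pairwise (· < ·) →
      (∀ u ∈ us, t ≤ u ∧ u ≤ r ∧ (Sg nums l r).count (nums[u.toNat]!) = 1) →
      (runGaps nums F r us t = true ↔ ∀ a b : Int, t ≤ a → a ≤ b → b ≤ r → Good nums a b) := by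
  intro us
  induction us with
  | nil =>
    intro t hlt htr hne _ _
    have hlt' : l < t := hne rfl
    rw [runGaps]
    rw [IH t r (by omega) hrn (by omega)]
    exact Iff.rfl
  | cons u us ih =>
    intro t hlt htr _ hpw hbound
    obtain ⟨htu, hur, hcnt⟩ := hbound u (by simp)
    rw [runGaps, Bool.and_eq_true]
    rw [IH t (u - 1) (by omega) (by omega) (by omega)]
    rw [ih (u + 1) (by omega) (by omega) (by omega) hpw.of_cons
        (fun v hv => ⟨by have := (List.pairwise_cons.mp hpw).1 v hv; omega,
                      (hbound v (by simp [hv])).2.1, (hbound v (by simp [hv])).2.2⟩)]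
    constructor
    · rintro ⟨h1, h2⟩ a b hta hab hbr
      by_cases hb : b ≤ u - 1
      · exact h1 a b hta hab hb
      · by_cases ha : u + 1 ≤ a
        · exact h2 a b ha hab hbr
        · exact good_of_splitter nums l r a b u hl (by omega) (by omega) (by omega) hbr
            (by omega) hcnt
    · intro h
      exact ⟨fun a b hta hab hbu => h a b hta hab (by omega),
             fun a b hua hab hbr => h a b (by omega) hab hbr⟩

theorem checkA_iff (nums : List Int) : ∀ (F : Nat) (l r : Int), 0 ≤ l →
    r < nums.length → (r - l).toNat + 1 ≤ F →
    (checkA nums F l r = true ↔ AllGood nums l r) := by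
  intro F
  induction F with
  | zero => intro l r _ _ h; omega
  | succ F IH =>
    intro l r hl hrn hF
    by_cases hbase : l ≥ r
    · rw [checkA, if_pos (by exact_mod_cast hbase)]
      simp only [true_iff]
      intro a b h1 h2 h3
      have : a = b := by omega
      subst this
      exact good_single nums a (by omega) (by omega)
    · have hlt : l < r := by omega
      have hne : Sg nums l r ≠ [] := by
        have := length_Sg nums l r hl (by omega)
        intro h
        rw [h] at this
        simp at this
        omega
      obtain ⟨m, hm, hmin, x0, hx0, hx0e⟩ := min_values_cases (Sg nums l r) hne
      unfold Sg at hm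
      rw [checkA, if_neg (by omega)]
      simp only
      rw [hm]
      split
      next heq => exact absurd heq (by simp)
      next mf heq =>
        obtain rfl : mf = m := by injection heq with h; omega
        split
        next hm1 =>
          simp only [Bool.false_eq_true, false_iff]
          intro hAG
          obtain ⟨x, hx, hc⟩ := hAG l r le_rfl (by omega) le_rfl
          have := hmin x hx
          omega
        next hm1 =>
          rw [loop_eq]
          have hU : ∀ u, (u ∈ (PySem.List.enumerate (PySem.List.slice nums (some l) (some (r+1))) l).filterMap
              (fun p => if PySem.Dict.getD (PySem.Dict.counter (PySem.List.slice nums (some l) (some (r+1)))) p.2 0 == 1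
                        then some p.1 else none))
              ↔ (l ≤ u ∧ u ≤ r ∧ (Sg nums l r).count (nums[u.toNat]!) = 1) :=
            fun u => mem_U nums l r u hl hlt hrn
          have hlen := length_Sg nums l r hl (by omega)
          -- the minimum count is 1, so some position of the segment is unique
          have hx0c : (Sg nums l r).count x0 = 1 := by
            have : 0 < (Sg nums l r).count x0 := List.count_pos_iff.mpr hx0
            omega
          obtain ⟨k, hk, hkx⟩ := List.getElem_of_mem hx0
          have hu_mem : (l + (k : Int)) ∈ (PySem.List.enumerate (PySem.List.slice nums (some l) (some (r+1))) l).filterMap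
              (fun p => if PySem.Dict.getD (PySem.Dict.counter (PySem.List.slice nums (some l) (some (r+1)))) p.2 0 == 1
                        then some p.1 else none) := by
            apply (hU _).mpr
            have hget : nums[(l + (k : Int)).toNat]! = x0 := by
              rw [← hkx, Sg_getElem nums l r k hl hk (by omega),
                  getElem!_pos nums _ (by omega : (l + (k : Int)).toNat < nums.length)]
              congr 1
              omega
            exact ⟨by omega, by omega, by rw [hget]; exact hx0c⟩
          have hpw : ((PySem.List.enumerate (PySem.List.slice nums (some l) (some (r+1))) l).filterMap
              (fun p => if PySem.Dict.getD (PySem.Dict.counter (PySem.List.slice nums (some l) (some (r+1)))) p.2 0 == 1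
                        then some p.1 else none)).Pairwise (· < ·) := by
            apply List.pairwise_filterMap.mpr
            apply (PySem.List.pairwise_lt_enumerate _ _).imp
            intro p q hpq b hb b' hb'
            split at hb <;> split at hb' <;> simp_all
          rw [runGapsIff nums F l r IH hl hlt hrn (by omega) _ l le_rfl (by omega)
              (fun h => absurd h (List.ne_nil_of_mem hu_mem)) hpw
              (fun u hu => ((hU u).mp hu).elim (fun h1 h2 => ⟨h1, h2⟩))]
          exact Iff.rfl
theorem solve_iff (nums : List Int) :
    solve nums = true ↔ AllGood nums 0 ((nums.length : Int) - 1) := by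
  unfold solve
  exact checkA_iff nums (nums.length + 1) 0 ((nums.length : Int) - 1) le_rfl (by omega) (by omega)

theorem solve_alt_iff (nums : List Int) :
    solve_alt nums = true ↔ AllGood nums 0 ((nums.length : Int) - 1) := by
  unfold solve_alt
  rw [Bool.not_eq_true']
  simp only [List.any_eq_false, List.all_eq_true, PySem.List.mem_pyRange_one,
    decide_eq_true_eq, not_forall, not_lt, PySem.List.count_eq, Bool.not_eq_true]
  unfold AllGood Good Sg
  constructor
  · intro h a b ha hab hbr
    obtain ⟨x, hx, hc⟩ := h a ⟨ha, by omega⟩ b ⟨hab, by omega⟩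
    have hpos : 0 < List.count x (PySem.List.slice nums (some a) (some (b + 1))) :=
      List.count_pos_iff.mpr hx
    exact ⟨x, hx, by omega⟩
  · intro h a ⟨ha, han⟩ b ⟨hab, hbn⟩
    obtain ⟨x, hx, hc⟩ := h a b ha hab (by omega)
    exact ⟨x, hx, by omega⟩

-- ===== VERDICT (by name: the statement is the Claim_ definition above) =====
theorem solve_spec : Claim_equal_solve := by
  intro nums _
  unfold Spec_solve
  have h := (solve_iff nums).trans (solve_alt_iff nums).symm
  cases hA : solve nums <;> cases hB : solve_alt nums <;> simp_all
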